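-- pv_equiv track=rewrite | github.com/Sknton/python_labs_km14_skakun | p10_skakun/p10_skakun_2.py | leap_year_detector
-- ===== SOURCE A (Python) =====
-- def leap_year_detector(years):
--     leap_years = list(filter(lambda year: year % 400 == 0, years))
--     years_that_remain1 = []
--     for i in years:
--         if i in leap_years:
--             continue
--         else:
--             years_that_remain1.append(i)
--     no_leap_years = list(filter(lambda year: year % 100 == 0, years_that_remain1))
--     years_that_remain3 = []
--     for i in years_that_remain1:
--         if i in no_leap_years:
--             continue
--         else:
--             years_that_remain3.append(i)
--     leap_years_4 = list(filter(lambda year: year % 4 == 0, years_that_remain3))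
--     years_that_remain4 = []
--     for i in years_that_remain3:
--         if i in leap_years_4:
--             continue
--         else:
--             years_that_remain4.append(i)
--     leap_years.extend(leap_years_4)
--     no_leap_years.extend(years_that_remain4)
--     return(leap_years, no_leap_years)
-- ===== SOURCE B (Python) =====
-- def leap_year_detector(years):
--     # single pass: classify each year into one of four ordered buckets, then concatenate
--     by400, by100, by4, rest = [], [], [], []
--     for y in years:
--         if y % 400 == 0:
--             by400.append(y)
--         elif y % 100 == 0:
--             by100.append(y)
--         elif y % 4 == 0:
--             by4.append(y)
--         else:
--             rest.append(y)
--     return (by400 + by4, by100 + rest)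
-- ===== Notes on version B (the rewrite author's own statement) =====
-- stated objective: faster
-- what changed: Replaced A's three filter passes each followed by a quadratic membership-test loop with a single pass that classifies each year by divisibility into four ordered buckets and concatenates them.
import Mathlib
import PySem

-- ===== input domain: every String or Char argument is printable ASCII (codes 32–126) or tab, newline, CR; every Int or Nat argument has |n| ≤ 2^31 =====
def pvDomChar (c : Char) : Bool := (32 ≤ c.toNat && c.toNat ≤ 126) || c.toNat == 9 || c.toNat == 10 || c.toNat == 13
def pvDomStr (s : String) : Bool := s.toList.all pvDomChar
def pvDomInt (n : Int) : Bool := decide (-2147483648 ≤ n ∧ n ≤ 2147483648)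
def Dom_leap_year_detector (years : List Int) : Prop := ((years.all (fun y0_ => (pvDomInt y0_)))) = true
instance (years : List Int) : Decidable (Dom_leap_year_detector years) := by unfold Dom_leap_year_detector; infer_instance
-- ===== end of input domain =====

-- B replaces A's repeated filter + quadratic membership loops by one O(n) classifying pass (faster, asymptotic).


-- ===== PORT A =====
def leap_year_detector (years : List Int) : List Int × List Int :=
  let leap_years := years.filter (fun year => PySem.Int.mod year 400 == 0)
  let years_that_remain1 := years.foldl
    (fun acc i => if leap_years.contains i then acc else acc ++ [i]) []
  let no_leap_years := years_that_remain1.filter (fun year => PySem.Int.mod year 100 == 0)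
  let years_that_remain3 := years_that_remain1.foldl
    (fun acc i => if no_leap_years.contains i then acc else acc ++ [i]) []
  let leap_years_4 := years_that_remain3.filter (fun year => PySem.Int.mod year 4 == 0)
  let years_that_remain4 := years_that_remain3.foldl
    (fun acc i => if leap_years_4.contains i then acc else acc ++ [i]) []
  (leap_years ++ leap_years_4, no_leap_years ++ years_that_remain4)

-- ===== PORT B =====
def leap_year_detector_alt (years : List Int) : List Int × List Int :=
  let st := years.foldl
    (fun (st : List Int × List Int × List Int × List Int) y =>
      let (b400, b100, b4, rest) := st
      if PySem.Int.mod y 400 == 0 then (b400 ++ [y], b100, b4, rest)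
      else if PySem.Int.mod y 100 == 0 then (b400, b100 ++ [y], b4, rest)
      else if PySem.Int.mod y 4 == 0 then (b400, b100, b4 ++ [y], rest)
      else (b400, b100, b4, rest ++ [y]))
    ([], [], [], [])
  (st.1 ++ st.2.2.1, st.2.1 ++ st.2.2.2)

-- ===== PRECONDITION & SPEC =====
def Spec_leap_year_detector (years : List Int) (out : List Int × List Int) : Prop := out = leap_year_detector_alt years
instance (years : List Int) (out : List Int × List Int) : Decidable (Spec_leap_year_detector years out) := by unfold Spec_leap_year_detector; infer_instance

-- ===== CLAIM (what is proved, stated in full; the proofs are below) =====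
def Claim_equal_leap_year_detector : Prop := ∀ (years : List Int), Dom_leap_year_detector years → Spec_leap_year_detector years (leap_year_detector years)

-- ===== LEMMAS AND PROOFS =====

-- A's "skip if member" loop is the filter by the negated test.
theorem pvLoopFilter (p : Int → Bool) (xs acc : List Int) :
    xs.foldl (fun acc i => if p i then acc else acc ++ [i]) acc
      = acc ++ xs.filter (fun i => !p i) := by
  induction xs generalizing acc with
  | nil => simp
  | cons x xs ih =>
    by_cases h : p x = true <;> simp [List.foldl, h, ih, List.filter]

-- membership in a filtered sublist, for an element of the base list, is the test itself
theorem pvContainsFilter (p : Int → Bool) (xs : List Int) (i : Int) (hi : i ∈ xs) :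
    (xs.filter p).contains i = p i := by
  by_cases h : p i = true
  · simp [List.mem_filter, hi, h]
  · simp only [Bool.not_eq_true] at h
    simp [List.mem_filter, h]

theorem pvB_fold (p q r : Int → Bool) (xs b400 b100 b4 rest : List Int) :
    xs.foldl
      (fun (st : List Int × List Int × List Int × List Int) y =>
        let (b400, b100, b4, rest) := st
        if p y then (b400 ++ [y], b100, b4, rest)
        else if q y then (b400, b100 ++ [y], b4, rest)
        else if r y then (b400, b100, b4 ++ [y], rest)
        else (b400, b100, b4, rest ++ [y]))
      (b400, b100, b4, rest)
    = (b400 ++ xs.filter p,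
       b100 ++ (xs.filter (fun y => !p y)).filter q,
       b4 ++ ((xs.filter (fun y => !p y)).filter (fun y => !q y)).filter r,
       rest ++ ((xs.filter (fun y => !p y)).filter (fun y => !q y)).filter (fun y => !r y)) := by
  induction xs generalizing b400 b100 b4 rest with
  | nil => simp
  | cons x xs ih =>
    simp only [List.foldl_cons, List.filter_cons]
    by_cases h4 : p x = true
    · simp [h4, ih]
    · rw [Bool.not_eq_true] at h4
      by_cases h1 : q x = true
      · simp [h4, h1, ih]
      · rw [Bool.not_eq_true] at h1
        by_cases h0 : r x = true
        · simp [h4, h1, h0, ih]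
        · rw [Bool.not_eq_true] at h0
          simp [h4, h1, h0, ih]

-- A's three sieve loops: filter-member skip over the same list = filter by negation
theorem pvSieve (q : Int → Bool) (xs : List Int) :
    xs.foldl (fun acc i => if (xs.filter q).contains i then acc else acc ++ [i]) []
      = xs.filter (fun i => !q i) := by
  rw [pvLoopFilter]
  simp only [List.nil_append]
  apply List.filter_congr
  intro x hx
  rw [pvContainsFilter _ _ _ hx]

-- ===== VERDICT (by name: the statement is the Claim_ definition above) =====
theorem leap_year_detector_spec : Claim_equal_leap_year_detector := by
  intro years _
  unfold Spec_leap_year_detector leap_year_detector leap_year_detector_alt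
  rw [pvB_fold]
  simp only [pvSieve]
  simp
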